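-- pv_equiv track=rewrite | github.com/litestar-org/sqlspec | sqlspec/extensions/adk/converters.py | split_scoped_state
-- ===== SOURCE A (Python) =====
-- from typing import Any
--
-- def split_scoped_state(state: "dict[str, Any]") -> "tuple[dict[str, Any], dict[str, Any], dict[str, Any]]":
--     """Split state into app-scoped, user-scoped, and session-scoped buckets.
--
--     Args:
--         state: Full session state dict (temp: already stripped).
--
--     Returns:
--         Tuple of (app_state, user_state, session_state).
--         app_state: keys starting with "app:"
--         user_state: keys starting with "user:"
--         session_state: all other keys
--     """
--     app_state: dict[str, Any] = {}
--     user_state: dict[str, Any] = {}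
--     session_state: dict[str, Any] = {}
--     for k, v in state.items():
--         if k.startswith("app:"):
--             app_state[k] = v
--         elif k.startswith("user:"):
--             user_state[k] = v
--         else:
--             session_state[k] = v
--     return app_state, user_state, session_state
-- ===== SOURCE B (Python) =====
-- def _partition(items, prefix):
--     """Binary split of (key, value) pairs by key prefix, preserving order."""
--     yes, no = [], []
--     for k, v in items:
--         (yes if k.startswith(prefix) else no).append((k, v))
--     return yes, no
--
--
-- def split_scoped_state(state):
--     """Split state into app-scoped, user-scoped, and session-scoped buckets."""
--     app_items, rest = _partition(state.items(), "app:")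
--     user_items, session_items = _partition(rest, "user:")
--     return dict(app_items), dict(user_items), dict(session_items)
-- ===== Notes on version B (the rewrite author's own statement) =====
-- stated objective: alternative
-- what changed: Replaced the single three-way distributing loop over dicts with two staged binary partitions (split off app:-keys, then split the remainder by user:) on pair lists, converting each stage's list to a dict at the end.
import Mathlib
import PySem

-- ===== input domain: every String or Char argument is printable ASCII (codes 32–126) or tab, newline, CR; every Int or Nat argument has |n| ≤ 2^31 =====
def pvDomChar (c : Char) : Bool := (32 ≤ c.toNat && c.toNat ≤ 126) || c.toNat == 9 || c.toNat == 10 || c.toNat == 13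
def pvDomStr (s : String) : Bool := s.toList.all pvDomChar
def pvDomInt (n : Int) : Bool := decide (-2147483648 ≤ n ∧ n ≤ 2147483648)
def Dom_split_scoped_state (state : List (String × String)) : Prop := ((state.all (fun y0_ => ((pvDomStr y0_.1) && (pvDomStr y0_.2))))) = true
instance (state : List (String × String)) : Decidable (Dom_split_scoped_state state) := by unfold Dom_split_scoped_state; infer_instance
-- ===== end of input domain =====

-- B: two staged binary partitions (split off app:-keys, then split the remainder by user:) instead of one three-way distributing loop; same output.


-- ===== PORT A =====
-- A: one pass distributing each pair into one of three dicts.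
def split_scoped_state (state : List (String × String)) : (List (String × String)) × (List (String × String)) × (List (String × String)) :=
  let r := state.foldl
    (fun (acc : PySem.Dict String String × PySem.Dict String String × PySem.Dict String String) kv =>
      if PySem.Str.startswith kv.1 "app:" then (acc.1.insert kv.1 kv.2, acc.2.1, acc.2.2)
      else if PySem.Str.startswith kv.1 "user:" then (acc.1, acc.2.1.insert kv.1 kv.2, acc.2.2)
      else (acc.1, acc.2.1, acc.2.2.insert kv.1 kv.2))
    (PySem.Dict.empty, PySem.Dict.empty, PySem.Dict.empty)
  (r.1.items, r.2.1.items, r.2.2.items)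

-- ===== PORT B =====
-- B: two staged binary partitions on pair lists, then dict() of each list.
-- _partition: binary split by key prefix, preserving order (the Python loop appends to yes/no).
def pvPartition (items : List (String × String)) (pre : String) : List (String × String) × List (String × String) :=
  items.foldl
    (fun (acc : List (String × String) × List (String × String)) kv =>
      if PySem.Str.startswith kv.1 pre then (acc.1 ++ [kv], acc.2) else (acc.1, acc.2 ++ [kv]))
    ([], [])

-- dict(items): insert pairs in order (first-occurrence position, last value wins)
def pvDictOf (items : List (String × String)) : List (String × String) :=
  (items.foldl (fun (d : PySem.Dict String String) kv => d.insert kv.1 kv.2) PySem.Dict.empty).items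

def split_scoped_state_alt (state : List (String × String)) : (List (String × String)) × (List (String × String)) × (List (String × String)) :=
  let p1 := pvPartition state "app:"
  let p2 := pvPartition p1.2 "user:"
  (pvDictOf p1.1, pvDictOf p2.1, pvDictOf p2.2)

-- ===== PRECONDITION & SPEC =====
def Spec_split_scoped_state (state : List (String × String)) (out : (List (String × String)) × (List (String × String)) × (List (String × String))) : Prop := out = split_scoped_state_alt state
instance (state : List (String × String)) (out : (List (String × String)) × (List (String × String)) × (List (String × String))) : Decidable (Spec_split_scoped_state state out) := by unfold Spec_split_scoped_state; infer_instance

-- ===== CLAIM (what is proved, stated in full; the proofs are below) =====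
def Claim_equal_split_scoped_state : Prop := ∀ (state : List (String × String)), Dom_split_scoped_state state → Spec_split_scoped_state state (split_scoped_state state)

-- ===== LEMMAS AND PROOFS =====
-- a key cannot start with both "app:" and "user:"
lemma not_both_prefixes (s : String) :
    PySem.Str.startswith s "app:" = true → PySem.Str.startswith s "user:" = true → False := by
  simp only [PySem.Str.startswith_eq]
  intro h1 h2
  rw [PySem.Chars.startswith_iff] at h1 h2
  obtain ⟨t1, e1⟩ := h1
  obtain ⟨t2, e2⟩ := h2
  have := e1.trans e2.symm
  simp at this

-- the partition fold is (filter p, filter ¬p)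
lemma pvPartition_eq (items : List (String × String)) (pre : String) :
    pvPartition items pre
      = (items.filter (fun kv => PySem.Str.startswith kv.1 pre),
         items.filter (fun kv => !PySem.Str.startswith kv.1 pre)) := by
  have gen : ∀ (its : List (String × String)) (ys ns : List (String × String)),
      its.foldl (fun (acc : List (String × String) × List (String × String)) kv =>
          if PySem.Str.startswith kv.1 pre then (acc.1 ++ [kv], acc.2) else (acc.1, acc.2 ++ [kv])) (ys, ns)
        = (ys ++ its.filter (fun kv => PySem.Str.startswith kv.1 pre),
           ns ++ its.filter (fun kv => !PySem.Str.startswith kv.1 pre)) := by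
    intro its
    induction its with
    | nil => simp
    | cons kv rest ih =>
      intro ys ns
      cases h : PySem.Str.startswith kv.1 pre <;>
        simp only [List.foldl_cons, List.filter_cons, h, Bool.not_true, Bool.not_false,
          Bool.false_eq_true, ite_true, ite_false, ih] <;> simp
  simpa using gen items [] []

-- A's guarded dict fold over state = plain dict fold over the filtered list
lemma foldl_if_insert_eq_filter (p : String → Bool) (items : List (String × String))
    (d : PySem.Dict String String) :
    items.foldl (fun d kv => if p kv.1 then d.insert kv.1 kv.2 else d) d
      = (items.filter (fun kv => p kv.1)).foldl (fun d kv => d.insert kv.1 kv.2) d := by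
  induction items generalizing d with
  | nil => rfl
  | cons kv rest ih =>
    by_cases h : p kv.1 = true <;> simp [h, ih]

-- A's triple-dict fold splits into three independent guarded folds
lemma split_loop_eq (state : List (String × String))
    (a u s : PySem.Dict String String) :
    state.foldl
      (fun (acc : PySem.Dict String String × PySem.Dict String String × PySem.Dict String String) kv =>
        if PySem.Str.startswith kv.1 "app:" then (acc.1.insert kv.1 kv.2, acc.2.1, acc.2.2)
        else if PySem.Str.startswith kv.1 "user:" then (acc.1, acc.2.1.insert kv.1 kv.2, acc.2.2)
        else (acc.1, acc.2.1, acc.2.2.insert kv.1 kv.2)) (a, u, s)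
    = (state.foldl (fun d kv => if PySem.Str.startswith kv.1 "app:" then d.insert kv.1 kv.2 else d) a,
       state.foldl (fun d kv => if PySem.Str.startswith kv.1 "user:" then d.insert kv.1 kv.2 else d) u,
       state.foldl (fun d kv => if (!PySem.Str.startswith kv.1 "app:" && !PySem.Str.startswith kv.1 "user:") then d.insert kv.1 kv.2 else d) s) := by
  induction state generalizing a u s with
  | nil => rfl
  | cons kv rest ih =>
    cases h1 : PySem.Str.startswith kv.1 "app:" <;>
      cases h2 : PySem.Str.startswith kv.1 "user:"
    · simp only [List.foldl_cons, h1, h2, Bool.not_false, Bool.and_self,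
        Bool.false_eq_true, ite_false, ite_true]
      exact ih _ _ _
    · simp only [List.foldl_cons, h1, h2, Bool.not_false, Bool.not_true,
        Bool.and_false, Bool.false_eq_true, ite_false, ite_true]
      exact ih _ _ _
    · simp only [List.foldl_cons, h1, h2, Bool.not_true, Bool.false_and,
        Bool.false_eq_true, ite_false, ite_true]
      exact ih _ _ _
    · exact (not_both_prefixes kv.1 h1 h2).elim

-- filtering the non-app remainder by "user:" is the same as filtering state by "user:"
lemma filter_rest_user (state : List (String × String)) :
    (state.filter (fun kv => !PySem.Str.startswith kv.1 "app:")).filter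
        (fun kv => PySem.Str.startswith kv.1 "user:")
      = state.filter (fun kv => PySem.Str.startswith kv.1 "user:") := by
  rw [List.filter_filter]
  apply List.filter_congr
  intro kv _
  cases h2 : PySem.Str.startswith kv.1 "user:"
  · simp
  · cases h1 : PySem.Str.startswith kv.1 "app:"
    · simp
    · exact (not_both_prefixes kv.1 h1 h2).elim

lemma filter_rest_nonuser (state : List (String × String)) :
    (state.filter (fun kv => !PySem.Str.startswith kv.1 "app:")).filter
        (fun kv => !PySem.Str.startswith kv.1 "user:")
      = state.filter (fun kv => !PySem.Str.startswith kv.1 "app:" && !PySem.Str.startswith kv.1 "user:") := by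
  rw [List.filter_filter]
  apply List.filter_congr
  intro kv _
  rw [Bool.and_comm]

-- ===== VERDICT (by name: the statement is the Claim_ definition above) =====
theorem split_scoped_state_spec : Claim_equal_split_scoped_state := by
  intro state _
  show split_scoped_state state = split_scoped_state_alt state
  unfold split_scoped_state split_scoped_state_alt pvDictOf
  rw [split_loop_eq]
  simp only [pvPartition_eq, filter_rest_user, filter_rest_nonuser]
  rw [foldl_if_insert_eq_filter (fun k => PySem.Str.startswith k "app:"),
    foldl_if_insert_eq_filter (fun k => PySem.Str.startswith k "user:"),
    foldl_if_insert_eq_filter (fun k => !PySem.Str.startswith k "app:" && !PySem.Str.startswith k "user:")]
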